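-- pv_equiv track=rewrite | github.com/forlilab/Meeko | scripts/mk_prepare_receptor.py | parse_cmdline_res
-- ===== SOURCE A (Python) =====
-- def parse_cmdline_res(string):
--     """ "A:5,7,BB:12C  ->  "A:5", "A:7", "BB:12C" """
--     blocks = ("," + string).split(":")
--     nr_blocks = len(blocks) - 1
--     keys = []
--     for i in range(nr_blocks):
--         chain = blocks[i].split(",")[-1]
--         if i + 1 == nr_blocks:
--             resnums = blocks[i + 1].split(",")
--         else:
--             resnums = blocks[i + 1].split(",")[:-1]
--         if len(resnums) == 0:
--             raise ValueError(f"missing residue in {resnums}")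
--         for resnum in resnums:
--             keys.append(f"{chain}:{resnum}")
--     return keys
-- ===== SOURCE B (Python) =====
-- def parse_cmdline_res(string):
--     """Expand "A:5,7,BB:12C" into ["A:5", "A:7", "BB:12C"].
--
--     A token containing ':' names a chain and a residue; a bare token reuses
--     the most recently named chain.  Bare tokens appearing before any chain
--     has been named carry no chain and are ignored.
--     """
--     chain = None
--     keys = []
--     for token in string.split(","):
--         if ":" in token:
--             chain, resnum = token.split(":")  # ValueError if more than one ':'
--             keys.append(f"{chain}:{resnum}")
--         elif chain is not None:
--             keys.append(f"{chain}:{token}")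
--     return keys
-- ===== Notes on version B (the rewrite author's own statement) =====
-- stated objective: idiomatic
-- what changed: A splits ','+string on ':' and walks adjacent block pairs with index arithmetic, re-splitting each block on ',' to recover chain and residues; B makes a single left-to-right pass over string.split(',') with a current-chain variable, unpacking chain:resnum tokens directly. Pre_ excludes exactly the inputs on which A raises ValueError (a comma-token with two or more colons); B also raises ValueError there.
import Mathlib
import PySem

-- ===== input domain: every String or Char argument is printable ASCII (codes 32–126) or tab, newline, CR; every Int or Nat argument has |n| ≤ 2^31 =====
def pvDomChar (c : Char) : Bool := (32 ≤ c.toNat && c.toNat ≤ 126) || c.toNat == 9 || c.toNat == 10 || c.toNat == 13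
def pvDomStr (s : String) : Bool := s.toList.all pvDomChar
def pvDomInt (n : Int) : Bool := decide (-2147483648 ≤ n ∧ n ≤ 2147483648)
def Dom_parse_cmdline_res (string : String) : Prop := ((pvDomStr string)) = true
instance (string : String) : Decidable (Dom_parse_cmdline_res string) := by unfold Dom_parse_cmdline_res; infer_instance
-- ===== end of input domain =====

-- B replaces A's block-splitting on ':' with index arithmetic by a single left-to-right pass
-- over the ','-tokens keeping a current-chain variable (objective: idiomatic; not faster).

-- ===== PORT A =====
/-- A's `for i in range(nr_blocks)` loop as structural recursion over adjacent pairs of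
`blocks`: `prev` is `blocks[i]`, the list argument is `blocks[i+1:]`, keys are appended
in the same order. -/
def pyA_go (prev : List Char) : List (List Char) → List String
  | [] => []
  | nxt :: rest =>
    -- chain = blocks[i].split(",")[-1]  ([-1] on the never-empty split result = last element)
    let chain := (PySem.Chars.splitOn prev [',']).getLastD []
    let resnums := if rest.isEmpty then PySem.Chars.splitOn nxt [',']
                   else (PySem.Chars.splitOn nxt [',']).dropLast
    if resnums.isEmpty then []  -- Python: raise ValueError(f"missing residue in {resnums}") — excluded by Pre_
    else resnums.map (fun r => String.ofList (chain ++ ':' :: r)) ++ pyA_go nxt rest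

def parse_cmdline_res (string : String) : List String :=
  let blocks := PySem.Chars.splitOn (',' :: string.toList) [':']   -- ("," + string).split(":")
  pyA_go (blocks.headD []) blocks.tail

-- ===== PORT B =====
/-- B's loop: one pass over `string.split(",")` with the current chain as state. -/
def pyB_go (chain : Option (List Char)) : List (List Char) → List String
  | [] => []
  | token :: toks =>
    if ':' ∈ token then                                 -- if ":" in token:
      match PySem.Chars.splitOn token [':'] with        --   chain, resnum = token.split(":")
      | [c, r] => String.ofList (c ++ ':' :: r) :: pyB_go (some c) toks
      | _ => []  -- Python: unpacking raises ValueError — excluded by Pre_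
    else
      match chain with                                  -- elif chain is not None:
      | some c => String.ofList (c ++ ':' :: token) :: pyB_go chain toks
      | none => pyB_go chain toks

def parse_cmdline_res_alt (string : String) : List String :=
  pyB_go none (PySem.Chars.splitOn string.toList [','])   -- string.split(",")

-- ===== PRECONDITION & SPEC =====
-- Pre_ excludes exactly the inputs on which A raises ValueError: a ','-token containing
-- two or more ':' (an empty non-final resnum block); B also raises ValueError there.
def Pre_parse_cmdline_res (string : String) : Prop :=
  ∀ t ∈ PySem.Chars.splitOn string.toList [','], (PySem.Chars.splitOn t [':']).length ≤ 2
instance (string : String) : Decidable (Pre_parse_cmdline_res string) := by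
  unfold Pre_parse_cmdline_res; infer_instance
def pvWitness_parse_cmdline_res : String := "A:5,7,BB:12C"

def Spec_parse_cmdline_res (string : String) (out : List String) : Prop := out = parse_cmdline_res_alt string
instance (string : String) (out : List String) : Decidable (Spec_parse_cmdline_res string out) := by unfold Spec_parse_cmdline_res; infer_instance

-- ===== CLAIM (what is proved, stated in full; the proofs are below) =====
def Claim_equal_parse_cmdline_res : Prop := ∀ (string : String), Dom_parse_cmdline_res string → Pre_parse_cmdline_res string → Spec_parse_cmdline_res string (parse_cmdline_res string)

-- ===== LEMMAS AND PROOFS =====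

/-- Single-character split, the structural recursion the proofs work with. -/
def splitC (d : Char) : List Char → List (List Char)
  | [] => [[]]
  | c :: rest =>
    if c = d then [] :: splitC d rest
    else
      match splitC d rest with
      | [] => [[c]]          -- unreachable: splitC is never []
      | h :: t => (c :: h) :: t

lemma splitC_ne_nil (d : Char) (u : List Char) : splitC d u ≠ [] := by
  cases u with
  | nil => simp [splitC]
  | cons c rest =>
    simp only [splitC]
    split
    · simp
    · split <;> simp

lemma cons_headD_tail {α : Type} {l : List α} (h : l ≠ []) (x : α) :
    l.headD x :: l.tail = l := by
  cases l with
  | nil => exact absurd rfl h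
  | cons a t => rfl

lemma go_spec (d : Char) (l : List Char) : ∀ (fuel : Nat), l.length ≤ fuel →
    ∀ (cur : List Char) (acc : List (List Char)),
    PySem.Chars.splitOn.go [d] fuel l cur acc =
      acc.reverse ++ ((cur.reverse ++ (splitC d l).headD []) :: (splitC d l).tail) := by
  induction l with
  | nil =>
    intro fuel _ cur acc
    cases fuel <;> simp [PySem.Chars.splitOn.go, splitC]
  | cons c rest ih =>
    intro fuel hf cur acc
    cases fuel with
    | zero => simp at hf
    | succ f =>
      have hrest : rest.length ≤ f := by simpa using hf
      by_cases hc : d = c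
      · subst hc
        have hpre : List.isPrefixOf [d] (d :: rest) = true := by
          simp [List.isPrefixOf]
        rw [show PySem.Chars.splitOn.go [d] (f + 1) (d :: rest) cur acc
              = PySem.Chars.splitOn.go [d] f (List.drop [d].length (d :: rest)) []
                  (cur.reverse :: acc) by
            simp [PySem.Chars.splitOn.go, hpre]]
        simp only [List.length_singleton, List.drop_succ_cons, List.drop_zero]
        rw [ih f hrest [] (cur.reverse :: acc)]
        have hne := splitC_ne_nil d rest
        simp only [splitC]
        rw [← cons_headD_tail hne ([] : List Char)]
        simp
      · have hpre : List.isPrefixOf [d] (c :: rest) = false := by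
          simp [List.isPrefixOf, hc]
        rw [show PySem.Chars.splitOn.go [d] (f + 1) (c :: rest) cur acc
              = PySem.Chars.splitOn.go [d] f rest (c :: cur) acc by
            simp [PySem.Chars.splitOn.go, hpre]]
        rw [ih f hrest (c :: cur) acc]
        obtain ⟨h, t, hht⟩ := List.exists_cons_of_ne_nil (splitC_ne_nil d rest)
        have hcd : ¬ c = d := fun h' => hc h'.symm
        simp [splitC, hcd, hht]

lemma splitOn_single_eq (u : List Char) (d : Char) :
    PySem.Chars.splitOn u [d] = splitC d u := by
  have h := go_spec d u (u.length + 1) (by omega) [] []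
  rw [show PySem.Chars.splitOn u [d]
        = PySem.Chars.splitOn.go [d] (u.length + 1) u [] [] from rfl, h]
  simp only [List.reverse_nil, List.nil_append]
  exact cons_headD_tail (splitC_ne_nil d u) []

lemma splitC_sepfree {d : Char} {u : List Char} (h : d ∉ u) : splitC d u = [u] := by
  induction u with
  | nil => simp [splitC]
  | cons c rest ih =>
    have hc : ¬ c = d := fun h' => h (by simp [h'])
    have hr : d ∉ rest := fun h' => h (by simp [h'])
    simp [splitC, hc, ih hr]

lemma splitC_prefix {d : Char} {a b : List Char} (h : d ∉ a) :
    splitC d (a ++ d :: b) = a :: splitC d b := by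
  induction a with
  | nil => simp [splitC]
  | cons c a' ih =>
    have hc : ¬ c = d := fun h' => h (by simp [h'])
    have ha : d ∉ a' := fun h' => h (by simp [h'])
    simp [splitC, hc, ih ha]

lemma splitC_suffix {d : Char} {c p : List Char} (h : d ∉ c) :
    splitC d (p ++ d :: c) = splitC d p ++ [c] := by
  induction p with
  | nil => simp [splitC, splitC_sepfree h]
  | cons e p' ih =>
    by_cases he : e = d
    · subst he; simp [splitC, ih]
    · obtain ⟨h', t', hht⟩ := List.exists_cons_of_ne_nil (splitC_ne_nil d p')
      simp [splitC, he, ih, hht]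

lemma joinC_splitC (d : Char) (u : List Char) :
    PySem.Chars.join [d] (splitC d u) = u := by
  induction u with
  | nil => simp [splitC, PySem.Chars.join_singleton]
  | cons c rest ih =>
    obtain ⟨h, t, hht⟩ := List.exists_cons_of_ne_nil (splitC_ne_nil d rest)
    rw [hht] at ih
    by_cases hc : c = d
    · subst hc
      rw [show splitC c (c :: rest) = [] :: h :: t by simp [splitC, hht],
          PySem.Chars.join_cons_cons, ih]
      simp
    · rw [show splitC d (c :: rest) = (c :: h) :: t by simp [splitC, hc, hht]]
      cases t with
      | nil =>
        rw [PySem.Chars.join_singleton] at ih ⊢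
        simp [ih]
      | cons t0 ts =>
        rw [PySem.Chars.join_cons_cons] at ih ⊢
        simp only [List.cons_append]
        rw [ih]

lemma splitC_two_le_of_mem {d : Char} {u : List Char} (h : d ∈ u) :
    2 ≤ (splitC d u).length := by
  induction u with
  | nil => simp at h
  | cons c rest ih =>
    by_cases hc : c = d
    · subst hc
      obtain ⟨h', t', hht⟩ := List.exists_cons_of_ne_nil (splitC_ne_nil c rest)
      rw [show splitC c (c :: rest) = [] :: splitC c rest by simp [splitC], hht]
      simp
    · have hd : d ∈ rest := by
        rcases List.mem_cons.mp h with h' | h'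
        · exact absurd h'.symm hc
        · exact h'
      obtain ⟨h', t', hht⟩ := List.exists_cons_of_ne_nil (splitC_ne_nil d rest)
      have h2 := ih hd
      rw [hht] at h2
      rw [show splitC d (c :: rest) = (c :: h') :: t' by simp [splitC, hc, hht]]
      simpa using h2

lemma splitC_eq_single {d : Char} {u x : List Char} (h : splitC d u = [x]) :
    x = u ∧ d ∉ u := by
  constructor
  · have := joinC_splitC d u
    rw [h, PySem.Chars.join_singleton] at this
    exact this
  · intro hd
    have := splitC_two_le_of_mem (d := d) hd
    rw [h] at this
    simp at this

lemma splitC_mem_sepfree {d : Char} {u t : List Char} (h : t ∈ splitC d u) : d ∉ t := by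
  induction u generalizing t with
  | nil => simp [splitC] at h; simp [h]
  | cons c rest ih =>
    by_cases hc : c = d
    · subst hc
      simp [splitC] at h
      rcases h with h | h
      · simp [h]
      · exact ih h
    · obtain ⟨h', t', hht⟩ := List.exists_cons_of_ne_nil (splitC_ne_nil d rest)
      simp [splitC, hc, hht] at h
      rcases h with h | h
      · subst h
        intro hmem
        rcases List.mem_cons.mp hmem with h'' | h''
        · exact hc h''.symm
        · exact ih (hht ▸ List.mem_cons_self ..) h''
      · exact ih (by rw [hht]; exact List.mem_cons_of_mem _ h)

/-- The ':'-blocks of `p ++ "," ++ ",".join(T)` built token by token (`p` colon-free,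
tokens with at most one ':'). -/
def blk (p : List Char) : List (List Char) → List (List Char)
  | [] => [p]
  | t :: ts =>
    match splitC ':' t with
    | [c, r] => (p ++ ',' :: c) :: blk r ts
    | [_] => blk (p ++ ',' :: t) ts
    | _ => [p]   -- unreachable under Pre_

lemma blk_ne_nil (p : List Char) (ts : List (List Char)) : blk p ts ≠ [] := by
  induction ts generalizing p with
  | nil => simp [blk]
  | cons t ts ih =>
    rcases hsp : splitC ':' t with _ | ⟨c, _ | ⟨r, _ | _⟩⟩ <;> simp [blk, hsp, ih]

lemma splitC_blk : ∀ (T : List (List Char)) (p : List Char), T ≠ [] → ':' ∉ p →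
    (∀ t ∈ T, (splitC ':' t).length ≤ 2) →
    splitC ':' (p ++ ',' :: PySem.Chars.join [','] T) = blk p T := by
  intro T
  induction T with
  | nil => intro p h; exact absurd rfl h
  | cons t ts ih =>
    intro p _ hp hok
    have ht := hok t (List.mem_cons_self ..)
    have hok' : ∀ u ∈ ts, (splitC ':' u).length ≤ 2 :=
      fun u hu => hok u (List.mem_cons_of_mem _ hu)
    rcases hsp : splitC ':' t with _ | ⟨x, _ | ⟨r, _ | _⟩⟩
    · exact absurd hsp (splitC_ne_nil ':' t)
    · -- one part: t is colon-free
      obtain ⟨hx, hcf⟩ := splitC_eq_single hsp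
      rw [hx] at hsp
      have hp' : ':' ∉ p ++ ',' :: t := by
        intro hm; rcases List.mem_append.mp hm with h | h
        · exact hp h
        · rcases List.mem_cons.mp h with h | h
          · simp at h
          · exact hcf h
      cases ts with
      | nil => simp [PySem.Chars.join_singleton, blk, hsp, splitC_sepfree hp']
      | cons t' ts' =>
        rw [show blk p (t :: t' :: ts') = blk (p ++ ',' :: t) (t' :: ts') from by
              simp [blk, hsp],
            PySem.Chars.join_cons_cons,
            show p ++ ',' :: (t ++ [','] ++ PySem.Chars.join [','] (t' :: ts'))
              = (p ++ ',' :: t) ++ ',' :: PySem.Chars.join [','] (t' :: ts') from by simp]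
        exact ih (p ++ ',' :: t) (by simp) hp' hok'
    · -- two parts: t = x ++ ':' :: r
      have hc : ':' ∉ x := splitC_mem_sepfree (hsp ▸ List.mem_cons_self ..)
      have hr : ':' ∉ r := splitC_mem_sepfree (by rw [hsp]; simp)
      have hteq : t = x ++ ':' :: r := by
        have := joinC_splitC ':' t
        rw [hsp, PySem.Chars.join_cons_cons, PySem.Chars.join_singleton] at this
        simpa using this.symm
      have hpc : ':' ∉ p ++ ',' :: x := by
        intro hm; rcases List.mem_append.mp hm with h | h
        · exact hp h
        · rcases List.mem_cons.mp h with h | h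
          · simp at h
          · exact hc h
      cases ts with
      | nil =>
        rw [show blk p [t] = [p ++ ',' :: x, r] from by simp [blk, hsp],
            PySem.Chars.join_singleton, hteq,
            show p ++ ',' :: (x ++ ':' :: r) = (p ++ ',' :: x) ++ ':' :: r from by simp,
            splitC_prefix hpc, splitC_sepfree hr]
      | cons t' ts' =>
        rw [show blk p (t :: t' :: ts') = (p ++ ',' :: x) :: blk r (t' :: ts') from by
              simp [blk, hsp],
            PySem.Chars.join_cons_cons, hteq,
            show p ++ ',' :: (x ++ ':' :: r ++ [','] ++ PySem.Chars.join [','] (t' :: ts'))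
              = (p ++ ',' :: x) ++ ':' :: (r ++ ',' :: PySem.Chars.join [','] (t' :: ts'))
              from by simp,
            splitC_prefix hpc, ih r (by simp) hr hok']
    · simp [hsp] at ht

lemma pyA_go_single (prev nxt : List Char) :
    pyA_go prev [nxt] =
      (if (splitC ',' nxt).isEmpty then []
       else (splitC ',' nxt).map
              (fun r => String.ofList ((splitC ',' prev).getLastD [] ++ ':' :: r))) := by
  rw [pyA_go]
  simp [splitOn_single_eq, pyA_go]

lemma pyA_go_cons (prev nxt b1 : List Char) (bs : List (List Char)) :
    pyA_go prev (nxt :: b1 :: bs) =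
      (if ((splitC ',' nxt).dropLast).isEmpty then []
       else ((splitC ',' nxt).dropLast).map
              (fun r => String.ofList ((splitC ',' prev).getLastD [] ++ ':' :: r))
            ++ pyA_go nxt (b1 :: bs)) := by
  rw [pyA_go]
  simp [splitOn_single_eq]

lemma goA_blk : ∀ (ts : List (List Char)) (p c prev : List Char), ':' ∉ p →
    (∀ t ∈ ts, (splitC ':' t).length ≤ 2 ∧ ',' ∉ t) →
    (splitC ',' prev).getLastD [] = c →
    pyA_go prev (blk p ts) =
      (splitC ',' p).map (fun f => String.ofList (c ++ ':' :: f)) ++ pyB_go (some c) ts := by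
  intro ts
  induction ts with
  | nil =>
    intro p c prev _ _ hchain
    rw [show blk p [] = [p] from by simp [blk], pyA_go_single, hchain]
    have hne := splitC_ne_nil ',' p
    simp [pyB_go, List.isEmpty_iff, hne]
  | cons t ts ih =>
    intro p c prev hp hok hchain
    obtain ⟨ht2, htc⟩ := hok t (List.mem_cons_self ..)
    have hok' : ∀ u ∈ ts, (splitC ':' u).length ≤ 2 ∧ ',' ∉ u :=
      fun u hu => hok u (List.mem_cons_of_mem _ hu)
    rcases hsp : splitC ':' t with _ | ⟨x, _ | ⟨r, _ | _⟩⟩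
    · exact absurd hsp (splitC_ne_nil ':' t)
    · -- colon-free token
      obtain ⟨hx, hcf⟩ := splitC_eq_single hsp
      rw [hx] at hsp
      have hp' : ':' ∉ p ++ ',' :: t := by
        intro hm; rcases List.mem_append.mp hm with h | h
        · exact hp h
        · rcases List.mem_cons.mp h with h | h
          · simp at h
          · exact hcf h
      rw [show blk p (t :: ts) = blk (p ++ ',' :: t) ts from by simp [blk, hsp],
          ih (p ++ ',' :: t) c prev hp' hok' hchain, splitC_suffix htc]
      simp [pyB_go, hcf]
    · -- token x ++ ':' :: r
      have hxc : ':' ∉ x := splitC_mem_sepfree (hsp ▸ List.mem_cons_self ..)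
      have hrc : ':' ∉ r := splitC_mem_sepfree (by rw [hsp]; simp)
      have hteq : t = x ++ ':' :: r := by
        have := joinC_splitC ':' t
        rw [hsp, PySem.Chars.join_cons_cons, PySem.Chars.join_singleton] at this
        simpa using this.symm
      have hcolmem : ':' ∈ t := by rw [hteq]; simp
      have hxcomma : ',' ∉ x := fun hm => htc (by rw [hteq]; exact List.mem_append.mpr (Or.inl hm))
      have hrcomma : ',' ∉ r := fun hm => htc (by rw [hteq]; simp [hm])
      have hnext : (splitC ',' (p ++ ',' :: x)).getLastD [] = x := by
        rw [splitC_suffix hxcomma]; simp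
      have hrec := ih r x (p ++ ',' :: x) hrc hok' hnext
      rw [splitC_sepfree hrcomma] at hrec
      obtain ⟨b1, bs, hbs⟩ := List.exists_cons_of_ne_nil (blk_ne_nil r ts)
      rw [show blk p (t :: ts) = (p ++ ',' :: x) :: blk r ts from by simp [blk, hsp],
          hbs, pyA_go_cons, ← hbs, hrec, hchain, splitC_suffix hxcomma]
      have hne := splitC_ne_nil ',' p
      simp [pyB_go, splitOn_single_eq, hsp, hcolmem, List.isEmpty_iff, hne]
    · simp [hsp] at ht2

lemma goA_top_blk : ∀ (T : List (List Char)) (p : List Char), ':' ∉ p →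
    (∀ t ∈ T, (splitC ':' t).length ≤ 2 ∧ ',' ∉ t) →
    pyA_go ((blk p T).headD []) (blk p T).tail = pyB_go none T := by
  intro T
  induction T with
  | nil => intro p _ _; simp [blk, pyA_go, pyB_go]
  | cons t ts ih =>
    intro p hp hok
    obtain ⟨ht2, htc⟩ := hok t (List.mem_cons_self ..)
    have hok' : ∀ u ∈ ts, (splitC ':' u).length ≤ 2 ∧ ',' ∉ u :=
      fun u hu => hok u (List.mem_cons_of_mem _ hu)
    rcases hsp : splitC ':' t with _ | ⟨x, _ | ⟨r, _ | _⟩⟩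
    · exact absurd hsp (splitC_ne_nil ':' t)
    · obtain ⟨hx, hcf⟩ := splitC_eq_single hsp
      rw [hx] at hsp
      have hp' : ':' ∉ p ++ ',' :: t := by
        intro hm; rcases List.mem_append.mp hm with h | h
        · exact hp h
        · rcases List.mem_cons.mp h with h | h
          · simp at h
          · exact hcf h
      rw [show blk p (t :: ts) = blk (p ++ ',' :: t) ts by simp [blk, hsp], ih _ hp' hok']
      simp [pyB_go, hcf]
    · have hxc : ':' ∉ x := splitC_mem_sepfree (hsp ▸ List.mem_cons_self ..)
      have hrc : ':' ∉ r := splitC_mem_sepfree (by rw [hsp]; simp)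
      have hteq : t = x ++ ':' :: r := by
        have := joinC_splitC ':' t
        rw [hsp, PySem.Chars.join_cons_cons, PySem.Chars.join_singleton] at this
        simpa using this.symm
      have hcolmem : ':' ∈ t := by rw [hteq]; simp
      have hxcomma : ',' ∉ x := fun hm => htc (by rw [hteq]; exact List.mem_append.mpr (Or.inl hm))
      have hrcomma : ',' ∉ r := fun hm => htc (by rw [hteq]; simp [hm])
      rw [show blk p (t :: ts) = (p ++ ',' :: x) :: blk r ts by simp [blk, hsp]]
      have hnext : (splitC ',' (p ++ ',' :: x)).getLastD [] = x := by
        rw [splitC_suffix hxcomma]; simp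
      have := goA_blk ts r x (p ++ ',' :: x) hrc hok' hnext
      rw [splitC_sepfree hrcomma] at this
      simp only [List.headD_cons, List.tail_cons]
      rw [this]
      simp [pyB_go, splitOn_single_eq, hsp, hcolmem]
    · simp [hsp] at ht2

-- ===== VERDICT (by name: the statement is the Claim_ definition above) =====
theorem parse_cmdline_res_spec : Claim_equal_parse_cmdline_res := by
  intro string _ hpre
  unfold Spec_parse_cmdline_res parse_cmdline_res parse_cmdline_res_alt
  rw [splitOn_single_eq, splitOn_single_eq]
  have hpre' : ∀ t ∈ splitC ',' string.toList, (splitC ':' t).length ≤ 2 := by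
    intro t ht
    have := hpre t (by rwa [splitOn_single_eq])
    rwa [splitOn_single_eq] at this
  have hokT : ∀ t ∈ splitC ',' string.toList,
      (splitC ':' t).length ≤ 2 ∧ ',' ∉ t := fun t ht =>
    ⟨hpre' t ht, splitC_mem_sepfree ht⟩
  have hTne : splitC ',' string.toList ≠ [] := splitC_ne_nil ',' string.toList
  have hjoin : ',' :: string.toList =
      ([] : List Char) ++ ',' :: PySem.Chars.join [','] (splitC ',' string.toList) := by
    rw [joinC_splitC]; rfl
  rw [hjoin, splitC_blk (splitC ',' string.toList) [] hTne (by simp) hpre']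
  exact goA_top_blk (splitC ',' string.toList) [] (by simp) hokT
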